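-- pv_equiv track=rewrite | github.com/BrianMills2718/kgas | src/clustering/intelligent_clusterer.py | _cluster_by_keywords
-- ===== SOURCE A (Python) =====
-- from typing import List, Dict, Any, Optional
--
-- def _cluster_by_keywords(documents: List[Dict[str, Any]]) -> List[set]:
--     """Fallback clustering by keywords when similarity clustering fails"""
--     keyword_groups = {}
--
--     for i, doc in enumerate(documents):
--         metadata = doc.get("metadata", {})
--         keywords = set(kw.lower() for kw in metadata.get("keywords", []))
--
--         # Find best keyword group
--         best_group = None
--         best_overlap = 0
--
--         for group_keywords, group_indices in keyword_groups.items():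
--             overlap = len(keywords.intersection(set(group_keywords.split("__"))))
--             if overlap > best_overlap:
--                 best_overlap = overlap
--                 best_group = group_keywords
--
--         if best_group and best_overlap > 0:
--             keyword_groups[best_group].add(i)
--         else:
--             # Create new group
--             group_key = "__".join(sorted(keywords)) if keywords else f"misc_{i}"
--             keyword_groups[group_key] = {i}
--
--     return [indices for indices in keyword_groups.values() if indices]
-- ===== SOURCE B (Python) =====
-- def _cluster_by_keywords(documents):
--     """Fallback clustering by keywords, via an inverted index keyword -> sharing groups."""
--     groups = {}   # group key -> set of doc indices (insertion order)
--     rank = {}     # group key -> creation rank (earliest-group tie-break)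
--     index = {}    # token -> list of group keys whose token set contains it
--     for i, doc in enumerate(documents):
--         metadata = doc.get("metadata", {})
--         keywords = set(kw.lower() for kw in metadata.get("keywords", []))
--
--         # Tally overlap only over groups sharing at least one keyword.
--         counts = {}
--         for kw in keywords:
--             for k in index.get(kw, ()):
--                 counts[k] = counts.get(k, 0) + 1
--
--         # Best group: maximal overlap, earliest-created group on ties.
--         best = None
--         for k, c in counts.items():
--             if best is None or c > counts[best] or (c == counts[best] and rank[k] < rank[best]):
--                 best = k
--
--         if best:
--             groups[best].add(i)
--         else:
--             key = "__".join(sorted(keywords)) if keywords else f"misc_{i}"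
--             if key not in groups:
--                 rank[key] = len(rank)
--                 for tok in set(key.split("__")):
--                     index.setdefault(tok, []).append(key)
--             groups[key] = {i}
--
--     return [s for s in groups.values() if s]
-- ===== Notes on version B (the rewrite author's own statement) =====
-- stated objective: alternative
-- what changed: B replaces A's per-document scan over every existing group (re-splitting each group key and intersecting keyword sets) with an inverted index keyword->groups: it tallies overlap counts only over groups sharing at least one keyword and picks the maximum with an earliest-created-group tie-break.
import Mathlib
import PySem

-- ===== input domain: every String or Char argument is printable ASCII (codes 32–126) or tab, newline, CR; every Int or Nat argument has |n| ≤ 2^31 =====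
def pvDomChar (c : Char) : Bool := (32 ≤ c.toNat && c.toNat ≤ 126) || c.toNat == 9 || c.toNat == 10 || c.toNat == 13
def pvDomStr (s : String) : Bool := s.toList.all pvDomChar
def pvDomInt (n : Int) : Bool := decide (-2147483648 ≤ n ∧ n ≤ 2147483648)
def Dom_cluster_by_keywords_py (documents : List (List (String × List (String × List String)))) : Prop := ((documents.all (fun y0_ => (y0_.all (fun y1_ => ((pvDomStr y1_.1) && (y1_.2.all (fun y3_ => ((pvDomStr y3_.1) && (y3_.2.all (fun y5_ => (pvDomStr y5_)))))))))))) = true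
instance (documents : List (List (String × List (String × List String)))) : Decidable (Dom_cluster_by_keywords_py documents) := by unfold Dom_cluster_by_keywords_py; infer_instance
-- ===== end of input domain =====

-- ===== PORT A =====
-- A scans every existing group per document, re-splitting each group key; B keeps an inverted index.
-- Shared helpers (identical lines in both Pythons): keyword extraction, key token set, new-group key.
def pvKeywords (doc : List (String × List (String × List String))) : PySem.Set String :=
  PySem.Set.ofList (((PySem.Dict.mk ((PySem.Dict.mk doc).getD "metadata" [])).getD "keywords" []).map PySem.Str.lower)

def pvTok (k : String) : PySem.Set String :=
  PySem.Set.ofList ((PySem.Str.split? k "__").getD [])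

def pvGroupKey (keywords : PySem.Set String) (i : Int) : String :=
  if keywords.isEmpty then "misc_" ++ PySem.Int.toStr i
  else PySem.Str.join "__" (PySem.List.sorted keywords (fun x => x) false)

def pvStepA (kg : PySem.Dict String (PySem.Set Int)) (i : Int)
    (doc : List (String × List (String × List String))) : PySem.Dict String (PySem.Set Int) :=
  let keywords := pvKeywords doc
  let scan := kg.items.foldl (fun (acc : Option String × Int) gp =>
      let overlap : Int := ((PySem.Set.inter keywords (pvTok gp.1)).length : Int)
      if acc.2 < overlap then (some gp.1, overlap) else acc) (none, 0)
  -- `if best_group and best_overlap > 0` : best_group is truthy iff it is a nonempty string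
  let newGroup := kg.insert (pvGroupKey keywords i) ([i] : PySem.Set Int)
  match scan.1 with
  | some g => if g ≠ "" ∧ 0 < scan.2 then kg.modify g [] (fun s => PySem.Set.add s i) else newGroup
  | none => newGroup

def cluster_by_keywords_py (documents : List (List (String × List (String × List String)))) : List (List Int) :=
  ((documents.zipIdx.foldl (fun kg p => pvStepA kg (p.2 : Int) p.1) PySem.Dict.empty).values).filter
    (fun s => !s.isEmpty)

-- ===== PORT B =====
def pvStepB (st : PySem.Dict String (PySem.Set Int) × PySem.Dict String Int × PySem.Dict String (List String))
    (i : Int) (doc : List (String × List (String × List String))) :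
    PySem.Dict String (PySem.Set Int) × PySem.Dict String Int × PySem.Dict String (List String) :=
  let g := st.1
  let rk := st.2.1
  let ix := st.2.2
  let keywords := pvKeywords doc
  let counts := keywords.foldl (fun (c : PySem.Dict String Int) kw =>
      (ix.getD kw []).foldl (fun c k => c.insert k (c.getD k 0 + 1)) c) PySem.Dict.empty
  let best := counts.items.foldl (fun (b : Option String) kc =>
      match b with
      | none => some kc.1
      | some b0 =>
          if counts.getD b0 0 < kc.2 ∨ (kc.2 = counts.getD b0 0 ∧ rk.getD kc.1 0 < rk.getD b0 0)
          then some kc.1 else b) none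
  let newGroup := fun (_ : Unit) =>
      let key := pvGroupKey keywords i
      let rkix :=
        if g.contains key then (rk, ix)
        else (rk.insert key (rk.size : Int),
              (pvTok key).foldl (fun d t => d.insert t (d.getD t [] ++ [key])) ix)
      (g.insert key ([i] : PySem.Set Int), rkix.1, rkix.2)
  match best with
  | some b0 => if b0 ≠ "" then (g.modify b0 [] (fun s => PySem.Set.add s i), rk, ix) else newGroup ()
  | none => newGroup ()

def cluster_by_keywords_py_alt (documents : List (List (String × List (String × List String)))) : List (List Int) :=
  ((documents.zipIdx.foldl (fun st p => pvStepB st (p.2 : Int) p.1)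
      (PySem.Dict.empty, PySem.Dict.empty, PySem.Dict.empty)).1.values).filter (fun s => !s.isEmpty)

-- ===== PRECONDITION & SPEC =====
def Spec_cluster_by_keywords_py (documents : List (List (String × List (String × List String)))) (out : List (List Int)) : Prop := out = cluster_by_keywords_py_alt documents
instance (documents : List (List (String × List (String × List String)))) (out : List (List Int)) : Decidable (Spec_cluster_by_keywords_py documents out) := by unfold Spec_cluster_by_keywords_py; infer_instance

-- ===== CLAIM (what is proved, stated in full; the proofs are below) =====
def Claim_equal_cluster_by_keywords_py : Prop := ∀ (documents : List (List (String × List (String × List String)))), Dom_cluster_by_keywords_py documents → Spec_cluster_by_keywords_py documents (cluster_by_keywords_py documents)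

-- ===== LEMMAS AND PROOFS =====

-- ===== LEMMAS AND PROOFS =====

-- overlap of the current keyword set with a group key (the quantity A computes per group)
def pvOv (K : PySem.Set String) (k : String) : Int :=
  ((PySem.Set.inter K (pvTok k)).length : Int)

-- invariant linking B's rank/index bookkeeping to the shared group dict
def pvInv (g : PySem.Dict String (PySem.Set Int)) (rk : PySem.Dict String Int)
    (ix : PySem.Dict String (List String)) : Prop :=
  g.keys.Nodup ∧
  rk.items = g.keys.zipIdx.map (fun p => (p.1, (p.2 : Int))) ∧
  ∀ t, ix.getD t [] = g.keys.filter (fun k => PySem.Set.contains (pvTok k) t)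

lemma pv_inv_empty : pvInv PySem.Dict.empty PySem.Dict.empty PySem.Dict.empty := by
  refine ⟨by simp [PySem.Dict.empty], ?_, ?_⟩
  · simp [PySem.Dict.keys_empty, PySem.Dict.empty]
  · intro t; simp [PySem.Dict.getD_empty, PySem.Dict.keys_empty]

lemma pv_rk_keys (g : PySem.Dict String (PySem.Set Int)) (rk : PySem.Dict String Int)
    (hrk : rk.items = g.keys.zipIdx.map (fun p => (p.1, (p.2 : Int)))) : rk.keys = g.keys := by
  have h1 : rk.keys = rk.items.map Prod.fst := rfl
  rw [h1, hrk, List.map_map]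
  have h2 : (Prod.fst ∘ fun p : String × Nat => (p.1, (p.2 : Int))) = Prod.fst := rfl
  rw [h2, List.zipIdx_map_fst]

-- A's first-strict-max scan, characterised
lemma pv_scan_spec (ov : String → Int) (l : List String) :
    (l.foldl (fun acc k => if acc.2 < ov k then (some k, ov k) else acc)
        ((none : Option String), (0 : Int)) = (none, 0) ∧ ∀ k ∈ l, ov k ≤ 0) ∨
    (∃ g0 l₁ l₂, l.foldl (fun acc k => if acc.2 < ov k then (some k, ov k) else acc)
        ((none : Option String), (0 : Int)) = (some g0, ov g0) ∧ 0 < ov g0 ∧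
      l = l₁ ++ g0 :: l₂ ∧ (∀ k ∈ l₁, ov k < ov g0) ∧ (∀ k ∈ l₂, ov k ≤ ov g0)) := by
  induction l using List.reverseRecOn with
  | nil => left; simp
  | append_singleton l x ih =>
    rw [List.foldl_append]
    rcases ih with ⟨h1, h2⟩ | ⟨g0, l₁, l₂, h1, hpos, hsplit, hl1, hl2⟩
    · rw [h1]
      by_cases hx : (0 : Int) < ov x
      · right
        exact ⟨x, l, [], by simp [hx], hx, rfl, fun k hk => lt_of_le_of_lt (h2 k hk) hx, by simp⟩
      · left
        refine ⟨by simp [hx], ?_⟩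
        intro k hk
        rcases List.mem_append.mp hk with hk | hk
        · exact h2 k hk
        · simp only [List.mem_singleton] at hk; subst hk; omega
    · rw [h1]
      by_cases hx : ov g0 < ov x
      · right
        refine ⟨x, l, [], by simp [hx], lt_trans hpos hx, rfl, ?_, by simp⟩
        intro k hk
        rw [hsplit] at hk
        rcases List.mem_append.mp hk with hk | hk
        · exact lt_trans (hl1 k hk) hx
        · rcases List.mem_cons.mp hk with hk | hk
          · subst hk; exact hx
          · exact lt_of_le_of_lt (hl2 k hk) hx
      · right
        refine ⟨g0, l₁, l₂ ++ [x], by simp [hx], hpos, by simp [hsplit], hl1, ?_⟩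
        intro k hk
        rcases List.mem_append.mp hk with hk | hk
        · exact hl2 k hk
        · simp only [List.mem_singleton] at hk; subst hk; omega

-- B's max-count / earliest-rank selection, characterised
lemma pv_best_spec (c pos : String → Int) (S : List String) :
    (S.foldl (fun b k => match b with
        | none => some k
        | some b0 => if c b0 < c k ∨ (c k = c b0 ∧ pos k < pos b0) then some k else b)
        (none : Option String) = none ∧ S = []) ∨
    (∃ g0, S.foldl (fun b k => match b with
        | none => some k
        | some b0 => if c b0 < c k ∨ (c k = c b0 ∧ pos k < pos b0) then some k else b)
        (none : Option String) = some g0 ∧ g0 ∈ S ∧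
      ∀ k ∈ S, c k ≤ c g0 ∧ (c k = c g0 → pos g0 ≤ pos k)) := by
  induction S using List.reverseRecOn with
  | nil => left; simp
  | append_singleton S x ih =>
    rw [List.foldl_append]
    rcases ih with ⟨h1, h2⟩ | ⟨g0, h1, hmem, hall⟩
    · subst h2; right
      refine ⟨x, by rfl, by simp, ?_⟩
      intro k hk; simp only [List.nil_append, List.mem_singleton] at hk; subst hk
      exact ⟨le_refl _, fun _ => le_refl _⟩
    · rw [h1]
      by_cases hup : c g0 < c x ∨ (c x = c g0 ∧ pos x < pos g0)
      · right
        refine ⟨x, by simp [hup], List.mem_append_right _ (by simp), ?_⟩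
        intro k hk
        rcases List.mem_append.mp hk with hk | hk
        · rcases hall k hk with ⟨hc, hp⟩
          rcases hup with hup | ⟨he, hp2⟩
          · refine ⟨by omega, fun h => by omega⟩
          · refine ⟨by omega, fun h => ?_⟩
            have := hp (by omega); omega
        · simp only [List.mem_singleton] at hk; subst hk
          exact ⟨le_refl _, fun _ => le_refl _⟩
      · right
        push_neg at hup
        refine ⟨g0, ?_, List.mem_append_left _ hmem, ?_⟩
        · simp only [List.foldl_cons, List.foldl_nil]
          rw [if_neg]; push_neg; exact hup
        · intro k hk
          rcases List.mem_append.mp hk with hk | hk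
          · exact hall k hk
          · simp only [List.mem_singleton] at hk; subst hk
            exact ⟨hup.1, fun h => hup.2 h⟩

-- positions read off the rank invariant
lemma pv_pos_split (g : PySem.Dict String (PySem.Set Int)) (rk : PySem.Dict String Int)
    (hnd : g.keys.Nodup)
    (hrk : rk.items = g.keys.zipIdx.map (fun p => (p.1, (p.2 : Int))))
    (l₁ : List String) (g0 : String) (l₂ : List String) (hsplit : g.keys = l₁ ++ g0 :: l₂) :
    rk.getD g0 0 = (l₁.length : Int) ∧ ∀ k ∈ l₂, ((l₁.length : Int) < rk.getD k 0) := by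
  have hndrk : rk.keys.Nodup := by rw [pv_rk_keys g rk hrk]; exact hnd
  have hmem : ∀ (k : String) (j : Nat), (k, j) ∈ g.keys.zipIdx → rk.getD k 0 = (j : Int) := by
    intro k j hj
    have hin : (k, (j : Int)) ∈ rk.items := by
      rw [hrk]; exact List.mem_map.mpr ⟨(k, j), hj, rfl⟩
    exact PySem.Dict.getD_of_mem_items rk hin hndrk 0
  have hz : g.keys.zipIdx = l₁.zipIdx ++ (g0, l₁.length) :: l₂.zipIdx (l₁.length + 1) := by
    rw [hsplit, List.zipIdx_append, List.zipIdx_cons]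
    simp
  constructor
  · exact hmem g0 l₁.length (by rw [hz]; exact List.mem_append_right _ List.mem_cons_self)
  · intro k hk
    obtain ⟨j, hjlt, hjk⟩ := List.mem_iff_getElem.mp hk
    have hmemz : (k, l₁.length + 1 + j) ∈ l₂.zipIdx (l₁.length + 1) := by
      have hg : (l₂.zipIdx (l₁.length + 1))[j]'(by simpa using hjlt) = (k, l₁.length + 1 + j) := by
        simp [List.getElem_zipIdx, hjk]
      rw [← hg]; exact List.getElem_mem _
    have := hmem k (l₁.length + 1 + j)
      (by rw [hz]; exact List.mem_append_right _ (List.mem_cons_of_mem _ hmemz))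
    rw [this]; push_cast; omega

lemma pv_sum_ite (l : List String) (p : String → Bool) :
    (l.map fun x => if p x then 1 else 0).sum = l.countP p := by
  induction l with
  | nil => rfl
  | cons a t ih => by_cases h : p a <;> simp [h, ih, Nat.add_comm]

-- count over a flatMap is the sum of the inner counts
lemma pv_count_flatMap (l : List String) (f : String → List String) (a : String) :
    (l.flatMap f).count a = (l.map (fun x => (f x).count a)).sum := by
  induction l with
  | nil => simp
  | cons x t ih => simp [List.flatMap_cons, List.count_append, ih]

-- the tally pass: counts holds exactly the groups sharing a keyword, with their overlaps
lemma pv_counts_spec (g : PySem.Dict String (PySem.Set Int)) (ix : PySem.Dict String (List String))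
    (K : PySem.Set String) (hnd : g.keys.Nodup)
    (hix : ∀ t, ix.getD t [] = g.keys.filter (fun k => PySem.Set.contains (pvTok k) t)) :
    (K.foldl (fun (c : PySem.Dict String Int) kw =>
        (ix.getD kw []).foldl (fun c k => c.insert k (c.getD k 0 + 1)) c) PySem.Dict.empty).keys.Nodup ∧
    (∀ k, k ∈ (K.foldl (fun (c : PySem.Dict String Int) kw =>
        (ix.getD kw []).foldl (fun c k => c.insert k (c.getD k 0 + 1)) c) PySem.Dict.empty).keys ↔
      (k ∈ g.keys ∧ 0 < pvOv K k)) ∧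
    (∀ k ∈ g.keys, (K.foldl (fun (c : PySem.Dict String Int) kw =>
        (ix.getD kw []).foldl (fun c k => c.insert k (c.getD k 0 + 1)) c) PySem.Dict.empty).getD k 0 = pvOv K k) := by
  have hflat : (K.foldl (fun (c : PySem.Dict String Int) kw =>
      (ix.getD kw []).foldl (fun c k => c.insert k (c.getD k 0 + 1)) c) PySem.Dict.empty) =
      (K.flatMap fun kw => ix.getD kw []).foldl (fun c k => c.insert k (c.getD k 0 + 1)) PySem.Dict.empty :=
    (List.foldl_flatMap).symm
  have hkeys : ((K.flatMap fun kw => ix.getD kw []).foldl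
      (fun (c : PySem.Dict String Int) k => c.insert k (c.getD k 0 + 1)) PySem.Dict.empty).keys =
      PySem.Set.ofList (K.flatMap fun kw => ix.getD kw []) := by
    rw [PySem.Dict.keys_foldl_insert]
    rw [PySem.Set.ofList_eq_foldl]
    rfl
  have hmemflat : ∀ k, k ∈ (K.flatMap fun kw => ix.getD kw []) ↔ (k ∈ g.keys ∧ 0 < pvOv K k) := by
    intro k
    rw [List.mem_flatMap]
    constructor
    · rintro ⟨kw, hkw, hkmem⟩
      rw [hix kw, List.mem_filter] at hkmem
      refine ⟨hkmem.1, ?_⟩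
      have : kw ∈ PySem.Set.inter K (pvTok k) := List.mem_filter.mpr ⟨hkw, hkmem.2⟩
      have hlen : 0 < (PySem.Set.inter K (pvTok k)).length := List.length_pos_of_mem this
      unfold pvOv; exact_mod_cast hlen
    · rintro ⟨hkg, hov⟩
      have hlen : 0 < (PySem.Set.inter K (pvTok k)).length := by
        unfold pvOv at hov; exact_mod_cast hov
      obtain ⟨kw, hkw⟩ := List.exists_mem_of_length_pos hlen
      have := List.mem_filter.mp hkw
      exact ⟨kw, this.1, by rw [hix kw]; exact List.mem_filter.mpr ⟨hkg, this.2⟩⟩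
  refine ⟨?_, ?_, ?_⟩
  · rw [hflat]
    exact PySem.Dict.nodup_keys_foldl_insert _ _ _ (by simp [PySem.Dict.keys_empty])
  · intro k
    rw [hflat, hkeys, PySem.Set.mem_ofList]
    exact hmemflat k
  · intro k hkg
    rw [hflat, PySem.Dict.getD_foldl_insert_add_one, PySem.Dict.getD_empty, zero_add]
    have hcount : (K.flatMap fun kw => ix.getD kw []).count k =
        (PySem.Set.inter K (pvTok k)).length := by
      rw [pv_count_flatMap]
      have hmapeq : (K.map fun kw => (ix.getD kw []).count k) =
          K.map fun kw => if PySem.Set.contains (pvTok k) kw then 1 else 0 := by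
        apply List.map_congr_left
        intro kw _
        rw [hix kw]
        by_cases hp : PySem.Set.contains (pvTok k) kw
        · rw [if_pos hp]
          have hmem : k ∈ g.keys.filter (fun k' => PySem.Set.contains (pvTok k') kw) :=
            List.mem_filter.mpr ⟨hkg, hp⟩
          exact List.Nodup.count (hnd.filter _) |>.trans (if_pos hmem)
        · rw [if_neg hp]
          have hmem : k ∉ g.keys.filter (fun k' => PySem.Set.contains (pvTok k') kw) := by
            intro hmem; exact hp ((List.mem_filter.mp hmem).2)
          exact List.count_eq_zero_of_not_mem hmem
      rw [hmapeq]
      have : (PySem.Set.inter K (pvTok k)).length =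
          K.countP (fun kw => PySem.Set.contains (pvTok k) kw) := by
        rw [List.countP_eq_length_filter]; rfl
      rw [this]
      exact pv_sum_ite K _
    rw [hcount]; rfl

-- effect of B's index-update pass on every bucket
lemma pv_ix_fold (toks : List String) (hn : toks.Nodup) (ix : PySem.Dict String (List String))
    (v : String) (t : String) :
    ((toks.foldl (fun d tk => d.insert tk (d.getD tk [] ++ [v])) ix).getD t []) =
      ix.getD t [] ++ (if t ∈ toks then [v] else []) := by
  induction toks generalizing ix with
  | nil => simp
  | cons tk toks ih =>
    rw [List.foldl_cons]
    rcases List.nodup_cons.mp hn with ⟨htk, hnd2⟩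
    by_cases ht : t = tk
    · subst ht
      rw [ih hnd2, PySem.Dict.getD_insert_self]
      simp [htk]
    · rw [ih hnd2, PySem.Dict.getD_insert_of_ne _ _ _ ht]
      by_cases hmem : t ∈ toks <;> simp [hmem, ht]

-- the two selections agree
lemma pv_select (ov c pos : String → Int) (keys S : List String)
    (hS : ∀ k, k ∈ S ↔ (k ∈ keys ∧ 0 < ov k))
    (hc : ∀ k ∈ S, c k = ov k)
    (hpos : ∀ l₁ g0 l₂, keys = l₁ ++ g0 :: l₂ →
      pos g0 = (l₁.length : Int) ∧ ∀ k ∈ l₂, ((l₁.length : Int) < pos k)) :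
    (keys.foldl (fun acc k => if acc.2 < ov k then (some k, ov k) else acc)
        ((none : Option String), (0 : Int))).1 =
    S.foldl (fun b k => match b with
        | none => some k
        | some b0 => if c b0 < c k ∨ (c k = c b0 ∧ pos k < pos b0) then some k else b)
        (none : Option String) := by
  rcases pv_scan_spec ov keys with ⟨h1, h2⟩ | ⟨g0, l₁, l₂, h1, hgpos, hsplit, hl1, hl2⟩
  · have hSnil : S = [] := by
      rw [List.eq_nil_iff_forall_not_mem]
      intro s hs
      rcases (hS s).mp hs with ⟨hsk, hso⟩
      have := h2 s hsk; omega
    rw [h1, hSnil]; rfl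
  · rw [h1]
    have hg0S : g0 ∈ S := (hS g0).mpr ⟨by rw [hsplit]; exact List.mem_append_right _ List.mem_cons_self, hgpos⟩
    rcases pv_best_spec c pos S with ⟨hb1, hb2⟩ | ⟨g1, hb1, hb1mem, hball⟩
    · rw [hb2] at hg0S; simp at hg0S
    · rw [hb1]
      rcases (hS g1).mp hb1mem with ⟨hg1k, hg1pos⟩
      have hle : ov g0 ≤ ov g1 := by
        have := hball g0 hg0S
        rw [hc g0 hg0S, hc g1 hb1mem] at this
        exact this.1
      rw [hsplit] at hg1k
      rcases List.mem_append.mp hg1k with hk | hk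
      · exact absurd hle (by have := hl1 g1 hk; omega)
      · rcases List.mem_cons.mp hk with hk | hk
        · rw [hk]
        · exfalso
          have hge : ov g1 ≤ ov g0 := hl2 g1 hk
          have heq : ov g1 = ov g0 := le_antisymm hge hle
          have hpos1 := hball g0 hg0S
          rw [hc g0 hg0S, hc g1 hb1mem] at hpos1
          have hplq : pos g1 ≤ pos g0 := hpos1.2 heq.symm
          obtain ⟨hpg0, hpl2⟩ := hpos l₁ g0 l₂ hsplit
          have := hpl2 g1 hk
          omega

-- inserting a genuinely new group preserves the invariant
lemma pv_inv_insert (g : PySem.Dict String (PySem.Set Int)) (rk : PySem.Dict String Int)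
    (ix : PySem.Dict String (List String)) (key : String) (i : Int)
    (hnd : g.keys.Nodup)
    (hrk : rk.items = g.keys.zipIdx.map (fun p => (p.1, (p.2 : Int))))
    (hix : ∀ t, ix.getD t [] = g.keys.filter (fun k => PySem.Set.contains (pvTok k) t))
    (hc : g.contains key = false) :
    pvInv (g.insert key ([i] : PySem.Set Int)) (rk.insert key (rk.size : Int))
      ((pvTok key).foldl (fun d t => d.insert t (d.getD t [] ++ [key])) ix) := by
  have hkmem : key ∉ g.keys := fun h =>
    by rw [(PySem.Dict.contains_iff_mem_keys g key).mpr h] at hc; cases hc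
  have hkeys' : (g.insert key ([i] : PySem.Set Int)).keys = g.keys ++ [key] :=
    PySem.Dict.keys_insert_of_not_contains g _ hc
  have hrkc : rk.contains key = false := by
    rw [← Bool.not_eq_true]
    intro h
    exact hkmem (by rw [← pv_rk_keys g rk hrk]; exact (PySem.Dict.contains_iff_mem_keys rk key).mp h)
  have hsize : rk.size = g.keys.length := by
    show rk.items.length = _
    rw [hrk, List.length_map, List.length_zipIdx]
  refine ⟨?_, ?_, ?_⟩
  · rw [hkeys']
    refine List.nodup_append.mpr ⟨hnd, List.nodup_singleton _, ?_⟩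
    intro a ha b hbmem hab
    have hbk : b = key := by simpa using hbmem
    exact hkmem ((hab.trans hbk) ▸ ha)
  · rw [hkeys', PySem.Dict.items_insert_of_not_contains rk _ hrkc, hrk, hsize,
      List.zipIdx_append, List.map_append]
    simp
  · intro t
    rw [hkeys', pv_ix_fold (pvTok key) (PySem.Set.nodup_ofList _) ix key t, hix t,
      List.filter_append]
    by_cases ht : t ∈ pvTok key
    · rw [if_pos ht]; simp [ht]
    · rw [if_neg ht]; simp [ht]

-- one step of B computes one step of A and preserves the invariant
lemma pv_step_eq (g : PySem.Dict String (PySem.Set Int)) (rk : PySem.Dict String Int)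
    (ix : PySem.Dict String (List String)) (i : Int)
    (doc : List (String × List (String × List String))) (hinv : pvInv g rk ix) :
    (pvStepB (g, rk, ix) i doc).1 = pvStepA g i doc ∧
    pvInv (pvStepB (g, rk, ix) i doc).1 (pvStepB (g, rk, ix) i doc).2.1
      (pvStepB (g, rk, ix) i doc).2.2 := by
  obtain ⟨hnd, hrk, hix⟩ := hinv
  obtain ⟨hndc, hmemc, hgetc⟩ := pv_counts_spec g ix (pvKeywords doc) hnd hix
  -- name the pieces
  set K := pvKeywords doc with hK
  set counts := K.foldl (fun (c : PySem.Dict String Int) kw =>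
      (ix.getD kw []).foldl (fun c k => c.insert k (c.getD k 0 + 1)) c) PySem.Dict.empty with hcounts
  -- A's scan rewritten as a fold over the keys
  have hitemsA : g.items = g.keys.map (fun k => (k, g.getD k [])) :=
    PySem.Dict.items_eq_map_keys g hnd []
  have hitemsC : counts.items = counts.keys.map (fun k => (k, counts.getD k 0)) :=
    PySem.Dict.items_eq_map_keys counts hndc 0
  -- selection equality
  have hsel := pv_select (pvOv K) (fun k => counts.getD k 0) (fun k => rk.getD k 0)
      g.keys counts.keys
      (fun k => hmemc k)
      (fun k hk => hgetc k ((hmemc k).mp hk).1)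
      (fun l₁ g0 l₂ hs => pv_pos_split g rk hnd hrk l₁ g0 l₂ hs)
  -- unfold both steps
  rw [pvStepA, pvStepB]
  have hov : ∀ k : String, ((PySem.Set.inter K (pvTok k)).length : Int) = pvOv K k := fun _ => rfl
  simp only [hitemsA, hitemsC, List.foldl_map, ← hK, ← hcounts, hov]
  simp only [] at hsel
  -- the new-group key
  set key := pvGroupKey K i with hkey
  rcases pv_scan_spec (pvOv K) g.keys with ⟨h1, h2⟩ | ⟨g0, l₁, l₂, h1, hpos, hsplit, hl1, hl2⟩
  all_goals rw [h1] at hsel ⊢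
  · -- no overlapping group: both create a new one
    rw [← hsel]
    dsimp only
    by_cases hc : g.contains key
    · rw [if_pos hc]
      exact ⟨rfl, by rw [PySem.Dict.keys_insert_of_contains g _ hc]; exact hnd,
        by rw [PySem.Dict.keys_insert_of_contains g _ hc]; exact hrk,
        fun t => by rw [PySem.Dict.keys_insert_of_contains g _ hc]; exact hix t⟩
    · rw [if_neg (by simpa using hc)]
      exact ⟨rfl, pv_inv_insert g rk ix key i hnd hrk hix (by simpa using hc)⟩
  · -- some group overlaps: the two selections agree on it
    rw [← hsel]
    dsimp only
    have hg0 : g0 ∈ g.keys := by rw [hsplit]; exact List.mem_append_right _ List.mem_cons_self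
    by_cases hne : g0 = ""
    · -- falsy group key: both fall through to the new-group branch
      subst hne
      rw [if_neg (fun h => h rfl), if_neg (fun (h : ("" : String) ≠ "" ∧ _) => h.1 rfl)]
      by_cases hc : g.contains key
      · rw [if_pos hc]
        exact ⟨rfl, by rw [PySem.Dict.keys_insert_of_contains g _ hc]; exact hnd,
          by rw [PySem.Dict.keys_insert_of_contains g _ hc]; exact hrk,
          fun t => by rw [PySem.Dict.keys_insert_of_contains g _ hc]; exact hix t⟩
      · rw [if_neg (by simpa using hc)]
        exact ⟨rfl, pv_inv_insert g rk ix key i hnd hrk hix (by simpa using hc)⟩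
    · -- both add i to group g0
      rw [if_pos hne, if_pos ⟨hne, hpos⟩]
      have hkeysm : (g.modify g0 [] fun s => PySem.Set.add s i).keys = g.keys := by
        rw [PySem.Dict.keys_modify,
          PySem.Dict.keys_insert_of_contains g _ ((PySem.Dict.contains_iff_mem_keys g g0).mpr hg0)]
      exact ⟨rfl, by rw [hkeysm]; exact hnd, by rw [hkeysm]; exact hrk,
        fun t => by rw [hkeysm]; exact hix t⟩

lemma pv_fold_eq (l : List ((List (String × List (String × List String))) × Nat))
    (g : PySem.Dict String (PySem.Set Int)) (rk : PySem.Dict String Int)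
    (ix : PySem.Dict String (List String)) (hinv : pvInv g rk ix) :
    (l.foldl (fun st p => pvStepB st ((p.2 : Int)) p.1) (g, rk, ix)).1 =
      l.foldl (fun kg p => pvStepA kg ((p.2 : Int)) p.1) g := by
  induction l generalizing g rk ix with
  | nil => rfl
  | cons p t ih =>
    rw [List.foldl_cons, List.foldl_cons]
    obtain ⟨heq, hinv'⟩ := pv_step_eq g rk ix (p.2 : Int) p.1 hinv
    have hst : pvStepB (g, rk, ix) (p.2 : Int) p.1 =
        ((pvStepB (g, rk, ix) (p.2 : Int) p.1).1, (pvStepB (g, rk, ix) (p.2 : Int) p.1).2.1,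
         (pvStepB (g, rk, ix) (p.2 : Int) p.1).2.2) := rfl
    rw [hst, heq] at hinv' ⊢
    exact ih _ _ _ hinv'

-- ===== VERDICT (by name: the statement is the Claim_ definition above) =====
theorem cluster_by_keywords_py_spec : Claim_equal_cluster_by_keywords_py := by
  intro documents _
  unfold Spec_cluster_by_keywords_py cluster_by_keywords_py cluster_by_keywords_py_alt
  rw [pv_fold_eq documents.zipIdx PySem.Dict.empty PySem.Dict.empty PySem.Dict.empty pv_inv_empty]
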